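-- pv_equiv track=rewrite | github.com/hyunjink1994/algorithm | pythonProject/D10/D10_01/D10_01.py | findXY
-- ===== SOURCE A (Python) =====
-- def findXY(li):
--     max_int = 0
--     for i in range(len(li)):
--         for j in range(len(li[0])):
--             if(max_int < li[i][j]):
--                 max_int = li[i][j]
--
--     answer_li =[]
--     for i in range(len(li)):
--         for j in range(len(li[0])):
--             if(li[i][j] == max_int):
--                 k = [i,j]
--                 answer_li.append(k)
--     return answer_li
-- ===== SOURCE B (Python) =====
-- def findXY(li):
--     best = 0
--     answer = []
--     for i in range(len(li)):
--         for j in range(len(li[0])):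
--             v = li[i][j]
--             if v > best:
--                 best = v
--                 answer = [[i, j]]
--             elif v == best:
--                 answer.append([i, j])
--     return answer
-- ===== Notes on version B (the rewrite author's own statement) =====
-- stated objective: alternative
-- what changed: B fuses A's two full nested scans (one to find the maximum, one to collect its positions) into a single pass that resets the candidate list on a strictly larger value and appends on ties.
import Mathlib
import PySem

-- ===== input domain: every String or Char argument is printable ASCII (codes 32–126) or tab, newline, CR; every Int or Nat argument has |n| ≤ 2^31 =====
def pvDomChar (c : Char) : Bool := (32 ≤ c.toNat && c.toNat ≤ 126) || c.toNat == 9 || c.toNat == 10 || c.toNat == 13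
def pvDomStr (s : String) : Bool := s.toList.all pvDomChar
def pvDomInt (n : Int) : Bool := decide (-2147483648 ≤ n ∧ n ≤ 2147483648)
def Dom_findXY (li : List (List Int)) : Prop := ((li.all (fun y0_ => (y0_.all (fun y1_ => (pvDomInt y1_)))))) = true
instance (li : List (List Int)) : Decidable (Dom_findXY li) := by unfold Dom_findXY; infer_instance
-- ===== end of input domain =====

-- B fuses A's two full nested scans (find the max, then collect its positions) into one pass
-- that resets the candidate list on a strictly larger value and appends on ties.
-- Element access li[i][j] is ported as getD (exact on Pre_, where every index is in range).

-- ===== PORT A =====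
def findXY (li : List (List Int)) : List (List Int) :=
  let c := (li.headD []).length
  let maxInt : Int :=
    (List.range li.length).foldl (fun m i =>
      (List.range c).foldl (fun m j =>
        if m < (li.getD i []).getD j 0 then (li.getD i []).getD j 0 else m) m) 0
  (List.range li.length).foldl (fun acc i =>
    (List.range c).foldl (fun acc j =>
      if (li.getD i []).getD j 0 = maxInt then acc ++ [[(i : Int), (j : Int)]] else acc) acc) []

-- ===== PORT B =====
def findXY_alt (li : List (List Int)) : List (List Int) :=
  let c := (li.headD []).length
  let s :=
    (List.range li.length).foldl (fun s i =>
      (List.range c).foldl (fun s j =>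
        let v := (li.getD i []).getD j 0
        if s.1 < v then (v, [[(i : Int), (j : Int)]])
        else if v = s.1 then (s.1, s.2 ++ [[(i : Int), (j : Int)]])
        else s) s) ((0 : Int), ([] : List (List Int)))
  s.2

-- ===== PRECONDITION & SPEC =====
-- Pre_ excludes jagged inputs where some row is shorter than row 0: there both A and B raise IndexError.
def Pre_findXY (li : List (List Int)) : Prop :=
  ∀ row ∈ li, (li.headD []).length ≤ row.length
instance (li : List (List Int)) : Decidable (Pre_findXY li) := by unfold Pre_findXY; infer_instance
def pvWitness_findXY : List (List Int) := [[1, 3], [3, 2]]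
def Spec_findXY (li : List (List Int)) (out : List (List Int)) : Prop := out = findXY_alt li
instance (li : List (List Int)) (out : List (List Int)) : Decidable (Spec_findXY li out) := by unfold Spec_findXY; infer_instance

-- ===== CLAIM (what is proved, stated in full; the proofs are below) =====
def Claim_equal_findXY : Prop := ∀ (li : List (List Int)), Dom_findXY li → Pre_findXY li → Spec_findXY li (findXY li)

-- ===== LEMMAS AND PROOFS =====

def pvPairs (n c : Nat) : List (Nat × Nat) :=
  (List.range n).flatMap (fun i => (List.range c).map (fun j => (i, j)))

def pvKey (p : Nat × Nat) : List Int := [(p.1 : Int), (p.2 : Int)]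

def pvUpd (f : Nat × Nat → Int) (m : Int) (p : Nat × Nat) : Int :=
  if m < f p then f p else m

def pvMaxL (f : Nat × Nat → Int) (ps : List (Nat × Nat)) (b : Int) : Int :=
  ps.foldl (pvUpd f) b

def pvCollect (f : Nat × Nat → Int) (M : Int) (acc : List (List Int)) (p : Nat × Nat) :
    List (List Int) :=
  if f p = M then acc ++ [pvKey p] else acc

def pvStep (f : Nat × Nat → Int) (s : Int × List (List Int)) (p : Nat × Nat) :
    Int × List (List Int) :=
  if s.1 < f p then (f p, [pvKey p])
  else if f p = s.1 then (s.1, s.2 ++ [pvKey p])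
  else s

-- a nested fold over two index ranges is a fold over the flattened index-pair list
theorem pv_nested_eq_flat {α : Type} (n c : Nat) (g : α → Nat × Nat → α) (init : α) :
    (List.range n).foldl (fun a i => (List.range c).foldl (fun a j => g a (i, j)) a) init
      = (pvPairs n c).foldl g init := by
  simp [pvPairs, List.foldl_flatMap, List.foldl_map]

theorem pv_mem_le_maxL (f : Nat × Nat → Int) (ps : List (Nat × Nat)) (b : Int) :
    ∀ q ∈ ps, f q ≤ pvMaxL f ps b := by
  have h : pvMaxL f ps b = ps.foldl (fun acc y => max acc (f y)) b := by
    unfold pvMaxL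
    refine PySem.List.foldl_congr_mem _ _ _ _ ?_
    intro acc x _
    by_cases h : acc < f x <;> simp [pvUpd, h, max_def] <;> omega
  rw [h]
  exact (PySem.List.le_foldl_max_int ps f b).2

theorem pv_maxL_append (f : Nat × Nat → Int) (ps : List (Nat × Nat)) (p : Nat × Nat) (b : Int) :
    pvMaxL f (ps ++ [p]) b = if pvMaxL f ps b < f p then f p else pvMaxL f ps b := by
  simp [pvMaxL, pvUpd, List.foldl_append]

-- the fused single pass computes the maximum together with the positions attaining it
theorem pv_fused_eq (f : Nat × Nat → Int) (ps : List (Nat × Nat)) :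
    ps.foldl (pvStep f) ((0 : Int), ([] : List (List Int)))
      = (pvMaxL f ps 0, (ps.filter (fun p => decide (f p = pvMaxL f ps 0))).map pvKey) := by
  induction ps using List.reverseRecOn with
  | nil => simp [pvMaxL]
  | append_singleton ps p ih =>
    have hM := pv_maxL_append f ps p 0
    have hle := pv_mem_le_maxL f ps 0
    rw [List.foldl_append, ih]
    by_cases h1 : pvMaxL f ps 0 < f p
    · have hnil : ps.filter (fun q => decide (f q = f p)) = [] := by
        refine List.filter_eq_nil_iff.mpr ?_
        intro q hq
        have := hle q hq
        simp only [decide_eq_true_eq]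
        omega
      simp [pvStep, h1, hM, hnil, List.filter_append]
    · by_cases h2 : f p = pvMaxL f ps 0
      · simp [pvStep, h2, hM, List.filter_append]
      · simp [pvStep, h1, h2, hM, List.filter_append]

-- both ports over the common index grid, abstracted over the value function f
theorem pv_main (n c : Nat) (f : Nat × Nat → Int) :
    (List.range n).foldl (fun acc i => (List.range c).foldl (fun acc j =>
        pvCollect f
          ((List.range n).foldl (fun m i => (List.range c).foldl (fun m j => pvUpd f m (i, j)) m) 0)
          acc (i, j)) acc) []
      = ((List.range n).foldl (fun s i => (List.range c).foldl (fun s j => pvStep f s (i, j)) s)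
          ((0 : Int), ([] : List (List Int)))).2 := by
  rw [pv_nested_eq_flat n c (pvUpd f) 0]
  have hM : List.foldl (pvUpd f) 0 (pvPairs n c) = pvMaxL f (pvPairs n c) 0 := rfl
  rw [hM, pv_nested_eq_flat n c (pvCollect f (pvMaxL f (pvPairs n c) 0)) [],
      pv_nested_eq_flat n c (pvStep f) ((0 : Int), ([] : List (List Int))), pv_fused_eq]
  have hcol : pvCollect f (pvMaxL f (pvPairs n c) 0)
      = fun acc p => if f p = pvMaxL f (pvPairs n c) 0 then acc ++ [pvKey p] else acc := rfl
  rw [hcol,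
    PySem.List.foldl_append_ite (p := fun p => f p = pvMaxL f (pvPairs n c) 0) (f := pvKey)]
  simp

-- ===== VERDICT (by name: the statement is the Claim_ definition above) =====
theorem findXY_spec : Claim_equal_findXY := by
  intro li _ _
  exact pv_main li.length ((li.headD []).length) (fun p => (li.getD p.1 []).getD p.2 0)
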